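-- pv_equiv track=rewrite | github.com/ITSP-ML/Chat-response-suggestions | src/src_models/ngrames_model/geenrate_ngames_dataset.py | get_ngrames
-- ===== SOURCE A (Python) =====
-- def get_ngrames(sentance):
--     """
--     function that get all ngrames and their status from a senatance
--     level of an ngrame will be use it to filter the Trie
--     """
--     ngram_level_dict ={}
--     words = sentance.split()
--     tmp = ''
--     for i, word in enumerate(words):
--         tmp = tmp + word + ' '
--         ngram_level_dict[tmp[:-1]] = i # this will indicate the level of ngrame (the level increase with the number of words) | also the same as the number of words
--
--     # ngram_level_dict[sentance] = -1 # indicate this is the original sentance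
--     return ngram_level_dict
-- ===== SOURCE B (Python) =====
-- def get_ngrames(sentance):
--     words = sentance.split()
--     return {' '.join(words[:i + 1]): i for i in range(len(words))}
-- ===== Notes on version B (the rewrite author's own statement) =====
-- stated objective: simpler
-- what changed: B replaces A's running string accumulator (tmp built up across iterations and sliced to drop the trailing separator each time) by a stateless dict comprehension that rebuilds each prefix independently by space-joining the slice words[:i+1].
import Mathlib
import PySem

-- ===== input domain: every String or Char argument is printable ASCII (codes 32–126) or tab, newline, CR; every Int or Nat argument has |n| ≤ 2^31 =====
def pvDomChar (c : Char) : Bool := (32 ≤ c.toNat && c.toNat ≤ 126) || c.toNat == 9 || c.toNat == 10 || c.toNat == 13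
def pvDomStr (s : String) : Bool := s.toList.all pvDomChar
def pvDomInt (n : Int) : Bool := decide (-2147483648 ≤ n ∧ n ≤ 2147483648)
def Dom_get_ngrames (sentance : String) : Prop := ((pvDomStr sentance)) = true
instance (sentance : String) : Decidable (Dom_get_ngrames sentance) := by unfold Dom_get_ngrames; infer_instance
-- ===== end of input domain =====

-- B replaces A's running `tmp` accumulator with a stateless comprehension joining an
-- independent slice of the word list per index (objective: simpler; same cost).


-- ===== PORT A =====
-- tmp is a Python str, carried here as List Char; tmp[:-1] is PySem.List.slice with end -1.
def get_ngrames (sentance : String) : List (String × Int) :=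
  let words := PySem.Str.split₀ sentance
  let st := (PySem.List.enumerate words 0).foldl
    (fun (st : List Char × PySem.Dict String Int) p =>
      let tmp := st.1 ++ p.2.toList ++ [' ']
      (tmp, st.2.insert (String.ofList (PySem.List.slice tmp none (some (-1)))) p.1))
    ([], PySem.Dict.empty)
  st.2.items

-- ===== PORT B =====
def get_ngrames_alt (sentance : String) : List (String × Int) :=
  let words := PySem.Str.split₀ sentance
  ((PySem.List.pyRange 0 (words.length : Int) 1).foldl
    (fun (d : PySem.Dict String Int) i =>
      d.insert (PySem.Str.join " " (PySem.List.slice words none (some (i + 1)))) i)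
    PySem.Dict.empty).items

-- ===== PRECONDITION & SPEC =====
def Spec_get_ngrames (sentance : String) (out : List (String × Int)) : Prop := out = get_ngrames_alt sentance
instance (sentance : String) (out : List (String × Int)) : Decidable (Spec_get_ngrames sentance out) := by unfold Spec_get_ngrames; infer_instance

-- ===== CLAIM (what is proved, stated in full; the proofs are below) =====
def Claim_equal_get_ngrames : Prop := ∀ (sentance : String), Dom_get_ngrames sentance → Spec_get_ngrames sentance (get_ngrames sentance)

-- ===== LEMMAS AND PROOFS =====

-- ' '-join of a list of words, on the character level
def joinC : List String → List Char
  | [] => []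
  | [w] => w.toList
  | w :: ws => w.toList ++ ' ' :: joinC ws

theorem joinC_cons (w : String) (ws : List String) (h : ws ≠ []) :
    joinC (w :: ws) = w.toList ++ ' ' :: joinC ws := by
  cases ws with
  | nil => exact absurd rfl h
  | cons a l => rfl

theorem toList_join_eq_joinC (ws : List String) :
    (PySem.Str.join " " ws).toList = joinC ws := by
  rw [PySem.Str.toList_join]
  induction ws with
  | nil => rfl
  | cons w ws ih =>
    cases ws with
    | nil => simp [joinC, PySem.Chars.join, List.intercalate]
    | cons a l =>
      rw [List.map_cons, List.map_cons, PySem.Chars.join_cons_cons,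
          joinC_cons _ _ (by simp), ← List.map_cons, ih]
      simp

theorem join_eq_ofList_joinC (ws : List String) :
    PySem.Str.join " " ws = String.ofList (joinC ws) := by
  rw [← toList_join_eq_joinC, String.ofList_toList]

theorem slice_concat_neg_one {α : Type} (xs : List α) (c : α) :
    PySem.List.slice (xs ++ [c]) none (some (-1)) = xs := by
  simp [PySem.List.slice]

-- the common canonical loop
def canonFold (ws : List String) : PySem.Dict String Int :=
  (List.range ws.length).foldl
    (fun d j => d.insert (String.ofList (joinC (ws.take (j + 1)))) (j : Int))
    PySem.Dict.empty

theorem A_loop (ws : List String) : ∀ (tmp : List Char) (i : Int) (d : PySem.Dict String Int),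
    ((PySem.List.enumerate ws i).foldl
      (fun (st : List Char × PySem.Dict String Int) p =>
        let tmp := st.1 ++ p.2.toList ++ [' ']
        (tmp, st.2.insert (String.ofList (PySem.List.slice tmp none (some (-1)))) p.1))
      (tmp, d)).2
    = (List.range ws.length).foldl
        (fun d j => d.insert (String.ofList (tmp ++ joinC (ws.take (j + 1)))) (i + (j : Int))) d := by
  induction ws with
  | nil => intro tmp i d; simp [PySem.List.enumerate_nil]
  | cons w ws ih =>
    intro tmp i d
    rw [PySem.List.enumerate_cons, List.foldl_cons]
    dsimp only
    rw [slice_concat_neg_one, ih]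
    simp only [List.length_cons]
    rw [List.range_succ_eq_map, List.foldl_cons, List.foldl_map]
    rw [show List.take (0 + 1) (w :: ws) = [w] by simp, show joinC [w] = w.toList from rfl]
    rw [show i + ((0 : Nat) : Int) = i by simp]
    apply PySem.List.foldl_congr_mem
    intro acc j hj
    rw [List.mem_range] at hj
    have h1 : List.take (Nat.succ j + 1) (w :: ws) = w :: ws.take (j + 1) := by simp
    have h2 : ws.take (j + 1) ≠ [] := by
      apply List.ne_nil_of_length_pos
      rw [List.length_take]
      omega
    rw [h1, joinC_cons _ _ h2]
    have h3 : tmp ++ w.toList ++ [' '] ++ joinC (ws.take (j + 1))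
        = tmp ++ (w.toList ++ ' ' :: joinC (ws.take (j + 1))) := by simp
    rw [h3]
    congr 1
    push_cast
    ring

theorem B_loop (ws : List String) :
    ((PySem.List.pyRange 0 (ws.length : Int) 1).foldl
      (fun (d : PySem.Dict String Int) i =>
        d.insert (PySem.Str.join " " (PySem.List.slice ws none (some (i + 1)))) i)
      PySem.Dict.empty)
    = canonFold ws := by
  unfold canonFold
  rw [PySem.List.pyRange_one]
  simp only [sub_zero, Int.toNat_natCast, List.foldl_map, zero_add]
  apply PySem.List.foldl_congr_mem
  intro acc j hj
  rw [List.mem_range] at hj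
  rw [PySem.List.slice_to ws (by positivity), join_eq_ofList_joinC]
  congr 2

-- ===== VERDICT (by name: the statement is the Claim_ definition above) =====
theorem get_ngrames_spec : Claim_equal_get_ngrames := by
  intro s _
  unfold Spec_get_ngrames get_ngrames get_ngrames_alt
  dsimp only
  rw [B_loop, A_loop]
  unfold canonFold
  simp
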